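-- pv_equiv track=rewrite | github.com/jahid674/NLT-In-sentence-pun-detection | pun_detector/agent.py | wrap_by_words
-- ===== SOURCE A (Python) =====
-- def wrap_by_words(text: str, max_words: int = 10) -> str:
--     words = text.split()
--     if not words:
--         return ""
--     lines, cur = [], []
--     for w in words:
--         cur.append(w)
--         if len(cur) >= max_words:
--             lines.append(" ".join(cur))
--             cur = []
--     if cur:
--         lines.append(" ".join(cur))
--     return "\n".join(lines)
-- ===== SOURCE B (Python) =====
-- def wrap_by_words(text: str, max_words: int = 10) -> str:
--     step = max(max_words, 1)
--     words = text.split()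
--     lines = []
--     while words:
--         lines.append(" ".join(words[:step]))
--         words = words[step:]
--     return "\n".join(lines)
-- ===== Notes on version B (the rewrite author's own statement) =====
-- stated objective: simpler
-- what changed: B slices the word list into fixed-size chunks (words[:step] / words[step:]) and joins them, instead of A's per-word accumulator flushed by a counter; step = max(max_words, 1) reproduces A's one-word-per-line behaviour for non-positive max_words.
import Mathlib
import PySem

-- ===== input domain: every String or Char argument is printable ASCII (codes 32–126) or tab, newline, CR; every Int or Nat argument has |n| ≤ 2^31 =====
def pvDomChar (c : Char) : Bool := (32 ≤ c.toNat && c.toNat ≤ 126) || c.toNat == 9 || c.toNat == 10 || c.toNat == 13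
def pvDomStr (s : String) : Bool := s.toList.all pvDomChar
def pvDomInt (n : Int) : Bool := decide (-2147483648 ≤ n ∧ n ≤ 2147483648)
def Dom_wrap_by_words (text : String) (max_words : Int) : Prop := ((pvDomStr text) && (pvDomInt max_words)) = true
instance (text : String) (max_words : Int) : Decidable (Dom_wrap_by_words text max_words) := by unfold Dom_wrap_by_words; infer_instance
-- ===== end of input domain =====

-- B wraps by slicing the word list into fixed-size chunks instead of A's per-word accumulator with a counter flush (objective: simpler).


-- ===== PORT A =====
-- the loop body: cur.append(w); if len(cur) >= max_words: lines.append(" ".join(cur)); cur = []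
def wrapA_step (max_words : Int) (p : List String × List String) (w : String) :
    List String × List String :=
  let cur := p.2 ++ [w]
  if (cur.length : Int) ≥ max_words then (p.1 ++ [PySem.Str.join " " cur], []) else (p.1, cur)

def wrap_by_words (text : String) (max_words : Int) : String :=
  let words := PySem.Str.split₀ text
  if words = [] then ""
  else
    let st := words.foldl (wrapA_step max_words) ([], [])
    let lines := if st.2 = [] then st.1 else st.1 ++ [PySem.Str.join " " st.2]
    PySem.Str.join "\n" lines

-- ===== PORT B =====
-- the while loop of Source B: while words: lines.append(" ".join(words[:step])); words = words[step:]
-- (fuel = the initial number of words; one chunk consumes at least one word since step ≥ 1)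
def wrapB_loop (step : Int) : Nat → List String → List String → List String
  | _, [], lines => lines
  | 0, _, lines => lines
  | fuel + 1, w :: ws, lines =>
      wrapB_loop step fuel (PySem.List.slice (w :: ws) (some step) none)
        (lines ++ [PySem.Str.join " " (PySem.List.slice (w :: ws) none (some step))])

def wrap_by_words_alt (text : String) (max_words : Int) : String :=
  let step : Int := max max_words 1
  let words := PySem.Str.split₀ text
  PySem.Str.join "\n" (wrapB_loop step words.length words [])

-- ===== PRECONDITION & SPEC =====
def Spec_wrap_by_words (text : String) (max_words : Int) (out : String) : Prop := out = wrap_by_words_alt text max_words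
instance (text : String) (max_words : Int) (out : String) : Decidable (Spec_wrap_by_words text max_words out) := by unfold Spec_wrap_by_words; infer_instance

-- ===== CLAIM (what is proved, stated in full; the proofs are below) =====
def Claim_equal_wrap_by_words : Prop := ∀ (text : String) (max_words : Int), Dom_wrap_by_words text max_words → Spec_wrap_by_words text max_words (wrap_by_words text max_words)

-- ===== LEMMAS AND PROOFS =====

-- reference chunking: split a list into groups of s (s ≥ 1 in all uses), each joined with " "
def chunksSpec (s : Nat) : List String → List String
  | [] => []
  | w :: ws =>
      PySem.Str.join " " (w :: ws.take (s - 1)) :: chunksSpec s (ws.drop (s - 1))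
termination_by ws => ws.length
decreasing_by simp; try omega

lemma chunksSpec_nil (s : Nat) : chunksSpec s [] = [] := by
  rw [chunksSpec.eq_def]

lemma chunksSpec_cons (s : Nat) (w : String) (ws : List String) :
    chunksSpec s (w :: ws) =
      PySem.Str.join " " (w :: ws.take (s - 1)) :: chunksSpec s (ws.drop (s - 1)) := by
  rw [chunksSpec.eq_def]

lemma wrapB_loop_eq_chunks (step : Int) (hstep : 1 ≤ step) :
    ∀ (fuel : Nat) (words lines : List String), words.length ≤ fuel →
      wrapB_loop step fuel words lines = lines ++ chunksSpec step.toNat words := by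
  intro fuel
  induction fuel with
  | zero =>
    intro words lines h
    have : words = [] := List.eq_nil_of_length_eq_zero (by omega)
    subst this
    simp [wrapB_loop, chunksSpec_nil]
  | succ f ih =>
    intro words lines h
    cases words with
    | nil => simp [wrapB_loop, chunksSpec_nil]
    | cons w ws =>
      have hs : step.toNat = (step.toNat - 1) + 1 := by omega
      rw [wrapB_loop, PySem.List.slice_from _ (by omega), PySem.List.slice_to _ (by omega)]
      rw [ih _ _ (by simp at h ⊢; omega)]
      rw [chunksSpec_cons]
      have ht : (w :: ws).take step.toNat = w :: ws.take (step.toNat - 1) := by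
        rw [hs]; simp
      have hd : (w :: ws).drop step.toNat = ws.drop (step.toNat - 1) := by
        rw [hs]; simp
      simp [ht, hd]

-- A's flush test "len(cur) >= max_words" is equivalent to comparing with step = max max_words 1
lemma flush_iff (max_words : Int) (n : Nat) (hn : 1 ≤ n) :
    (((n : Int) ≥ max_words) ↔ (max max_words 1).toNat ≤ n) := by
  by_cases h : max_words ≤ 1
  · have : (max max_words 1) = 1 := by omega
    rw [this]; constructor <;> intro _ <;> omega
  · have : (max max_words 1) = max_words := by omega
    rw [this]; omega

lemma wrapA_fold_eq_chunks (max_words : Int) :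
    ∀ (ws lines cur : List String), cur.length < (max max_words 1).toNat →
      (let st := ws.foldl (wrapA_step max_words) (lines, cur)
       if st.2 = [] then st.1 else st.1 ++ [PySem.Str.join " " st.2]) =
      lines ++ chunksSpec (max max_words 1).toNat (cur ++ ws) := by
  intro ws
  induction ws with
  | nil =>
    intro lines cur hcur
    cases cur with
    | nil => simp [chunksSpec_nil]
    | cons c cs =>
      have hn : cs.length + 1 < (max max_words 1).toNat := by simpa using hcur
      simp only [List.foldl_nil, List.append_nil]
      rw [chunksSpec_cons]
      have h1 : cs.take ((max max_words 1).toNat - 1) = cs := by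
        apply List.take_of_length_le; omega
      have h2 : cs.drop ((max max_words 1).toNat - 1) = [] := by
        apply List.drop_eq_nil_of_le; omega
      simp [h1, h2, chunksSpec_nil]
  | cons w ws ih =>
    intro lines cur hcur
    simp only [List.foldl_cons]
    rw [wrapA_step]
    by_cases hf : (((cur ++ [w]).length : Int) ≥ max_words)
    · -- flush: cur ++ [w] has exactly step elements
      have hlen : (cur ++ [w]).length = (max max_words 1).toNat := by
        have := (flush_iff max_words (cur ++ [w]).length (by simp)).mp hf
        have hl : (cur ++ [w]).length = cur.length + 1 := by simp
        omega
      rw [if_pos hf]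
      rw [ih _ [] (by simp)]
      have hassoc : cur ++ w :: ws = (cur ++ [w]) ++ ws := by simp
      rw [hassoc]
      cases hcw : cur ++ [w] with
      | nil => simp at hcw
      | cons c cs =>
        rw [List.cons_append, chunksSpec_cons]
        have hcs : cs.length = (max max_words 1).toNat - 1 := by
          have h1 : cur.length + 1 = cs.length + 1 := by
            simpa using congrArg List.length hcw
          have h2 : (cur ++ [w]).length = cur.length + 1 := by simp
          omega
        have ht : (cs ++ ws).take ((max max_words 1).toNat - 1) = cs := by
          rw [List.take_append_of_le_length (by omega), List.take_of_length_le (by omega)]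
        have hd : (cs ++ ws).drop ((max max_words 1).toNat - 1) = ws := by
          rw [List.drop_append_of_le_length (by omega), List.drop_eq_nil_of_le (by omega)]
          simp
        simp [ht, hd, ← hcw]
    · -- no flush
      rw [if_neg hf]
      have hlt : (cur ++ [w]).length < (max max_words 1).toNat := by
        have := (flush_iff max_words (cur ++ [w]).length (by simp)).not.mp hf
        have hl : (cur ++ [w]).length = cur.length + 1 := by simp
        omega
      rw [ih _ _ hlt]
      simp

-- ===== VERDICT (by name: the statement is the Claim_ definition above) =====
theorem wrap_by_words_spec : Claim_equal_wrap_by_words := by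
  intro text max_words _
  unfold Spec_wrap_by_words wrap_by_words wrap_by_words_alt
  cases hw : PySem.Str.split₀ text with
  | nil => simp [wrapB_loop, PySem.Str.join]
  | cons w ws =>
    simp only [reduceCtorEq, if_false]
    rw [wrapB_loop_eq_chunks (max max_words 1) (by omega) _ _ _ (le_refl _)]
    have := wrapA_fold_eq_chunks max_words (w :: ws) [] [] (by simp)
    exact congrArg (PySem.Str.join "\n") (by simpa using this)
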